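/- GENERATED by farm/mkstatement.py from design/units.tsv (unit `DGifSlurp.3`) and the assertions of Gif/Spec/Seg_DGifSlurp.lean — do not edit.
   THE STATEMENT of the proof unit `DGifSlurp.3`: segment 3 of `DGifSlurp` (5 instructions; entries 0x10a6f9;
   exits 0x10a70b,0x10a8ed; ranges 0x10a6f9-0x10a70b)
   takes each of its entry assertions to one of its exit assertions (`Gif.Spec.DGifSlurp.Seg3`), given the contracts of its callees.
   What the names mean: ProgX/Base/Spec/Basic.lean (the shared hypotheses), Gif/Spec/Seg_DGifSlurp.lean (the assertions). The theorem to prove: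
   `theorem DGifSlurp_3_ok : Gif.Spec.DGifSlurp_3.Statement`. -/
import Gif.Code
import Gif.Dec.All
import Gif.Labels
import Gif.Spec.Desc
import Gif.Spec.Seg_DGifSlurp
namespace Gif.Spec.DGifSlurp_3
open X86 X86.User Asan

/-- The statement of unit `DGifSlurp.3`. -/
def Statement : Prop :=
  ∀ (Lay : Layout) (_hLay : Lay.hi = 0x1000000) (μ : Microarch) (_hμ : UserX.MicroOK μ) (u₀ : State)
    (_hcode : HasCodeNat Lay u₀ Gif.L.DGifSlurp.entry Gif.Code.code_DGifSlurp.nat Gif.L.DGifSlurp.size)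
    (_h_DGifGetImageDesc : ∀ (H : Heap) (rest : List Obj) (frames : List (Nat × FrameLayout)) (F : Forest) (R : Rd), Calls Lay μ ProgX.Base.WayInv (ProgX.Base.conv u₀) Gif.L.DGifGetImageDesc.entry (Gif.Spec.DGifGetImageDesc.spec H rest frames F R)),
    Gif.Spec.DGifSlurp.Seg3 Lay μ u₀

end Gif.Spec.DGifSlurp_3
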